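-- pv_equiv track=rewrite | github.com/dan1229/obsidian-google-cal-sync | main.py | remove_all_calendar_sections
-- ===== SOURCE A (Python) =====
-- def remove_all_calendar_sections(content):
--     """
--     Removes all calendar sections from the content, regardless of slight
--     header variations.
--     Returns (cleaned_content, number_of_sections_removed)
--     """
--     lines = content.splitlines()
--     new_lines = []
--     in_calendar_section = False
--     sections_removed = 0
--
--     for line in lines:
--         # Check for any variation of calendar headers
--         if (
--             line.strip().lower().startswith(("#", "##", "###"))
--             and "calendar" in line.strip().lower()
--         ):
--             in_calendar_section = True
--             sections_removed += 1
--             continue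
--
--         if in_calendar_section:
--             if line.strip().startswith(("#", "##", "###")):
--                 in_calendar_section = False
--                 new_lines.append(line)  # Keep that header
--         else:
--             new_lines.append(line)
--
--     return "\n".join(new_lines), sections_removed
-- ===== SOURCE B (Python) =====
-- def remove_all_calendar_sections(content):
--     """Group lines into sections (header + body), then drop calendar sections.
--     Returns (cleaned_content, number_of_sections_removed)."""
--     # Pass 1: materialize the section list. A section starts at every line whose
--     # stripped form starts with '#'; lines before the first header form a
--     # headerless initial section (header None).
--     sections = []
--     header = None
--     body = []
--     for line in content.splitlines():
--         if line.strip().startswith("#"):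
--             sections.append((header, body))
--             header = line
--             body = []
--         else:
--             body.append(line)
--     sections.append((header, body))
--     # Pass 2: keep non-calendar sections verbatim, count the dropped ones.
--     kept = []
--     removed = 0
--     for h, b in sections:
--         if h is not None and "calendar" in h.strip().lower():
--             removed += 1
--         else:
--             if h is not None:
--                 kept.append(h)
--             kept.extend(b)
--     return "\n".join(kept), removed
-- ===== Notes on version B (the rewrite author's own statement) =====
-- stated objective: alternative
-- what changed: Replaces A's single state-machine loop with an in-calendar-section flag by a group-then-filter decomposition: pass 1 materializes an explicit list of (header, body) sections, pass 2 drops whole calendar sections and counts them.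
import Mathlib
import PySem

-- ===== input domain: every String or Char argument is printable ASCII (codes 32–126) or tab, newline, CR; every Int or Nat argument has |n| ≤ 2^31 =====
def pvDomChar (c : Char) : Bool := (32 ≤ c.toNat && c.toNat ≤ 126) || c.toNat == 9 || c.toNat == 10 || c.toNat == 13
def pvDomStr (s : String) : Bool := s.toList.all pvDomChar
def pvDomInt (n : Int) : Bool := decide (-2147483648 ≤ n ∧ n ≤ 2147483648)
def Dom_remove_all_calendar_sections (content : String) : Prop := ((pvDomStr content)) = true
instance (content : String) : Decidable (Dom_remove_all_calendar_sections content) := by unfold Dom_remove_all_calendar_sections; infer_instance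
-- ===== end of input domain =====

-- B groups the lines into an explicit (header, body) section list in one pass and
-- then filters whole calendar sections out in a second pass (objective: alternative
-- decomposition, same cost); A is a single state-machine loop with an in-section flag.

-- ===== PORT A =====
def remove_all_calendar_sections (content : String) : String × Int :=
  let lines := PySem.Str.splitlines content
  let st := lines.foldl (fun (st : List String × Bool × Int) line =>
    if (PySem.Str.startswith (PySem.Str.lower (PySem.Str.strip line)) "#"
        || PySem.Str.startswith (PySem.Str.lower (PySem.Str.strip line)) "##"
        || PySem.Str.startswith (PySem.Str.lower (PySem.Str.strip line)) "###")
       && PySem.Str.isIn "calendar" (PySem.Str.lower (PySem.Str.strip line)) then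
      (st.1, true, st.2.2 + 1)
    else if st.2.1 then
      if PySem.Str.startswith (PySem.Str.strip line) "#"
         || PySem.Str.startswith (PySem.Str.strip line) "##"
         || PySem.Str.startswith (PySem.Str.strip line) "###" then
        (st.1 ++ [line], false, st.2.2)
      else
        (st.1, st.2.1, st.2.2)
    else
      (st.1 ++ [line], st.2.1, st.2.2)) ([], false, 0)
  (PySem.Str.join "\n" st.1, st.2.2)

-- ===== PORT B =====
-- pass 1 of Source B: materialize the section list (header : Option String, body lines)
def pvSections (lines : List String) : List (Option String × List String) :=
  let p := lines.foldl
    (fun (st : List (Option String × List String) × Option String × List String) line =>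
      if PySem.Str.startswith (PySem.Str.strip line) "#" then
        (st.1 ++ [(st.2.1, st.2.2)], some line, [])
      else
        (st.1, st.2.1, st.2.2 ++ [line])) ([], none, [])
  p.1 ++ [(p.2.1, p.2.2)]

def remove_all_calendar_sections_alt (content : String) : String × Int :=
  let sections := pvSections (PySem.Str.splitlines content)
  -- pass 2 of Source B: drop calendar sections, keep the rest verbatim
  let q := sections.foldl (fun (st : List String × Int) sec =>
    match sec.1 with
    | some h =>
      if PySem.Str.isIn "calendar" (PySem.Str.lower (PySem.Str.strip h)) then
        (st.1, st.2 + 1)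
      else
        (st.1 ++ [h] ++ sec.2, st.2)
    | none => (st.1 ++ sec.2, st.2)) ([], 0)
  (PySem.Str.join "\n" q.1, q.2)

-- ===== PRECONDITION & SPEC =====
def Spec_remove_all_calendar_sections (content : String) (out : String × Int) : Prop := out = remove_all_calendar_sections_alt content
instance (content : String) (out : String × Int) : Decidable (Spec_remove_all_calendar_sections content out) := by unfold Spec_remove_all_calendar_sections; infer_instance

-- ===== CLAIM (what is proved, stated in full; the proofs are below) =====
def Claim_equal_remove_all_calendar_sections : Prop := ∀ (content : String), Dom_remove_all_calendar_sections content → Spec_remove_all_calendar_sections content (remove_all_calendar_sections content)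

-- ===== LEMMAS AND PROOFS =====

set_option maxHeartbeats 1000000

-- proof-side abbreviations for the two tests
def pvIsH (l : String) : Bool := PySem.Str.startswith (PySem.Str.strip l) "#"
def pvIsC (l : String) : Bool := PySem.Str.isIn "calendar" (PySem.Str.lower (PySem.Str.strip l))

-- proof-side names for the three loop bodies (definitionally equal to the ports' lambdas)
def pvStepA (st : List String × Bool × Int) (line : String) : List String × Bool × Int :=
  if (PySem.Str.startswith (PySem.Str.lower (PySem.Str.strip line)) "#"
      || PySem.Str.startswith (PySem.Str.lower (PySem.Str.strip line)) "##"
      || PySem.Str.startswith (PySem.Str.lower (PySem.Str.strip line)) "###")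
     && PySem.Str.isIn "calendar" (PySem.Str.lower (PySem.Str.strip line)) then
    (st.1, true, st.2.2 + 1)
  else if st.2.1 then
    if PySem.Str.startswith (PySem.Str.strip line) "#"
       || PySem.Str.startswith (PySem.Str.strip line) "##"
       || PySem.Str.startswith (PySem.Str.strip line) "###" then
      (st.1 ++ [line], false, st.2.2)
    else
      (st.1, st.2.1, st.2.2)
  else
    (st.1 ++ [line], st.2.1, st.2.2)

def pvStepB (st : List (Option String × List String) × Option String × List String)
    (line : String) : List (Option String × List String) × Option String × List String :=
  if PySem.Str.startswith (PySem.Str.strip line) "#" then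
    (st.1 ++ [(st.2.1, st.2.2)], some line, [])
  else
    (st.1, st.2.1, st.2.2 ++ [line])

def pvStepC (st : List String × Int) (sec : Option String × List String) : List String × Int :=
  match sec.1 with
  | some h =>
    if PySem.Str.isIn "calendar" (PySem.Str.lower (PySem.Str.strip h)) then
      (st.1, st.2 + 1)
    else
      (st.1 ++ [h] ++ sec.2, st.2)
  | none => (st.1 ++ sec.2, st.2)

theorem lowerChar_eq_hash (c : Char) : (PySem.Chars.lowerChar c = '#') ↔ c = '#' := by
  unfold PySem.Chars.lowerChar
  split_ifs with h
  · simp only [PySem.Chars.isupper, Bool.and_eq_true, decide_eq_true_eq] at h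
    obtain ⟨h1, h2⟩ := h
    have hn1 : (65 : Nat) ≤ c.toNat := UInt32.le_iff_toNat_le.mp (Char.le_def.mp h1)
    have hn2 : c.toNat ≤ (90 : Nat) := UInt32.le_iff_toNat_le.mp (Char.le_def.mp h2)
    have h35 : ('#' : Char).toNat = 35 := by decide
    constructor
    · intro hc
      exfalso
      have h3 : (Char.ofNat (c.toNat + 32)).toNat = ('#' : Char).toNat := congrArg Char.toNat hc
      have hv : (c.toNat + 32).isValidChar := by unfold Nat.isValidChar; left; omega
      rw [Char.toNat_ofNat, if_pos hv] at h3
      omega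
    · intro hc
      subst hc
      omega
  · simp

theorem lowerChar_hash_beq (c : Char) : ('#' == PySem.Chars.lowerChar c) = ('#' == c) := by
  by_cases hc : c = '#'
  · subst hc
    have h : PySem.Chars.lowerChar '#' = '#' := by decide
    rw [h]
  · have hlc : PySem.Chars.lowerChar c ≠ '#' := fun e => hc ((lowerChar_eq_hash c).mp e)
    simp [Ne.symm hc, Ne.symm hlc]

theorem startswith_hash_lower (s : String) :
    PySem.Str.startswith (PySem.Str.lower s) "#" = PySem.Str.startswith s "#" := by
  simp only [PySem.Str.startswith_eq, PySem.Str.toList_lower]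
  rw [show ("#".toList = ['#']) from by decide]
  cases s.toList with
  | nil => simp [PySem.Chars.lower]
  | cons c t =>
    simp only [PySem.Chars.lower, List.map_cons, PySem.Chars.startswith]
    simp [List.isPrefixOf, lowerChar_hash_beq c]

theorem startswith_hash_or (s : String) :
    (PySem.Str.startswith s "#" || PySem.Str.startswith s "##" || PySem.Str.startswith s "###")
      = PySem.Str.startswith s "#" := by
  have key : ∀ p q : String, p.toList <+: q.toList →
      PySem.Str.startswith s q = true → PySem.Str.startswith s p = true := by
    intro p q hpq hq
    rw [PySem.Str.startswith_eq, PySem.Chars.startswith_iff] at *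
    exact hpq.trans hq
  cases ha : PySem.Str.startswith s "#" with
  | true => simp
  | false =>
    cases hb : PySem.Str.startswith s "##" with
    | true =>
      have h' := key "#" "##" (by decide) hb
      rw [h'] at ha
      simp at ha
    | false =>
      cases hc : PySem.Str.startswith s "###" with
      | true =>
        have h' := key "#" "###" (by decide) hc
        rw [h'] at ha
        simp at ha
      | false => simp

theorem pvStepA_eq (st : List String × Bool × Int) (line : String) :
    pvStepA st line =
      if pvIsH line && pvIsC line then (st.1, true, st.2.2 + 1)
      else if st.2.1 then
        if pvIsH line then (st.1 ++ [line], false, st.2.2) else (st.1, st.2.1, st.2.2)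
      else (st.1 ++ [line], st.2.1, st.2.2) := by
  unfold pvStepA pvIsH pvIsC
  rw [startswith_hash_or (PySem.Str.lower (PySem.Str.strip line)),
    startswith_hash_lower (PySem.Str.strip line),
    startswith_hash_or (PySem.Str.strip line)]

-- recursive characterisation of A's loop
def pvARec : List String → Bool → List String × Bool × Int
  | [], b => ([], b, 0)
  | l :: t, b =>
    if pvIsH l && pvIsC l then
      let r := pvARec t true
      (r.1, r.2.1, r.2.2 + 1)
    else if b then
      if pvIsH l then
        let r := pvARec t false
        (l :: r.1, r.2.1, r.2.2)
      else pvARec t b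
    else
      let r := pvARec t false
      (l :: r.1, r.2.1, r.2.2)

-- recursive characterisation of B's first pass: (lines before first header, headered sections)
def pvSplitF : List String → List String × List (String × List String)
  | [] => ([], [])
  | l :: t =>
    let r := pvSplitF t
    if pvIsH l then ([], (l, r.1) :: r.2) else (l :: r.1, r.2)

-- recursive characterisation of B's second pass on headered sections
def pvProc : List (String × List String) → List String × Int
  | [] => ([], 0)
  | (h, b) :: t =>
    let r := pvProc t
    if pvIsC h then (r.1, r.2 + 1) else (h :: (b ++ r.1), r.2)

def pvProcO : List (Option String × List String) → List String × Int
  | [] => ([], 0)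
  | (h, b) :: t =>
    let r := pvProcO t
    match h with
    | some hh => if pvIsC hh then (r.1, r.2 + 1) else (hh :: (b ++ r.1), r.2)
    | none => (b ++ r.1, r.2)

theorem aRec_foldl (ls : List String) (nl : List String) (b : Bool) (rem : Int) :
    List.foldl pvStepA (nl, b, rem) ls
      = (nl ++ (pvARec ls b).1, (pvARec ls b).2.1, rem + (pvARec ls b).2.2) := by
  induction ls generalizing nl b rem with
  | nil => simp [pvARec]
  | cons l t ih =>
    rw [List.foldl_cons, pvStepA_eq]
    by_cases h1 : (pvIsH l && pvIsC l) = true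
    · rw [if_pos h1, ih]
      simp only [pvARec, h1, if_pos]
      refine congrArg₂ Prod.mk rfl (congrArg₂ Prod.mk rfl ?_)
      ring
    · rw [if_neg h1]
      cases b with
      | true =>
        rw [if_pos rfl]
        by_cases h2 : pvIsH l = true
        · rw [if_pos h2, ih]
          simp only [h2, Bool.true_and, Bool.not_eq_true] at h1
          simp [pvARec, h1, h2, List.append_assoc]
        · rw [if_neg h2, ih]
          simp only [Bool.not_eq_true] at h2
          simp [pvARec, h2]
      | false =>
        rw [if_neg (by simp), ih]
        simp [pvARec, h1, List.append_assoc]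

theorem sections_foldl (ls : List String) (secs : List (Option String × List String))
    (h : Option String) (bd : List String) :
    (List.foldl pvStepB (secs, h, bd) ls).1
        ++ [((List.foldl pvStepB (secs, h, bd) ls).2.1, (List.foldl pvStepB (secs, h, bd) ls).2.2)]
    = secs ++ (h, bd ++ (pvSplitF ls).1) :: ((pvSplitF ls).2.map (fun p => (some p.1, p.2))) := by
  induction ls generalizing secs h bd with
  | nil => simp [pvSplitF]
  | cons l t ih =>
    rw [List.foldl_cons]
    by_cases h1 : pvIsH l = true
    · rw [show pvStepB (secs, h, bd) l = (secs ++ [(h, bd)], some l, []) from by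
        simp only [pvStepB]; exact if_pos h1]
      rw [ih]
      simp [pvSplitF, h1]
    · rw [show pvStepB (secs, h, bd) l = (secs, h, bd ++ [l]) from by
        simp only [pvStepB]; exact if_neg h1]
      rw [ih]
      simp only [Bool.not_eq_true] at h1
      simp [pvSplitF, h1, List.append_assoc]

theorem procO_map (ss : List (String × List String)) :
    pvProcO (ss.map (fun p => (some p.1, p.2))) = pvProc ss := by
  induction ss with
  | nil => rfl
  | cons p t ih =>
    obtain ⟨hh, bb⟩ := p
    simp [pvProcO, pvProc, ih]

theorem proc_foldl (secs : List (Option String × List String)) (kept : List String) (rem : Int) :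
    List.foldl pvStepC (kept, rem) secs
      = (kept ++ (pvProcO secs).1, rem + (pvProcO secs).2) := by
  induction secs generalizing kept rem with
  | nil => simp [pvProcO]
  | cons sec t ih =>
    obtain ⟨hh, bb⟩ := sec
    rw [List.foldl_cons]
    cases hh with
    | none =>
      rw [show pvStepC (kept, rem) (none, bb) = (kept ++ bb, rem) from rfl, ih]
      simp [pvProcO, List.append_assoc]
    | some s =>
      by_cases h1 : pvIsC s = true
      · rw [show pvStepC (kept, rem) (some s, bb) = (kept, rem + 1) from by
          simp only [pvStepC]; exact if_pos h1]
        rw [ih]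
        simp only [pvProcO, h1, if_pos]
        refine congrArg₂ Prod.mk rfl ?_
        ring
      · rw [show pvStepC (kept, rem) (some s, bb) = (kept ++ [s] ++ bb, rem) from by
          simp only [pvStepC]; exact if_neg h1]
        rw [ih]
        simp only [Bool.not_eq_true] at h1
        simp [pvProcO, h1, List.append_assoc]

-- the central equivalence of the two decompositions
theorem main_rec (ls : List String) :
    ((pvARec ls false).1 = (pvSplitF ls).1 ++ (pvProc (pvSplitF ls).2).1
      ∧ (pvARec ls false).2.2 = (pvProc (pvSplitF ls).2).2)
    ∧ ((pvARec ls true).1 = (pvProc (pvSplitF ls).2).1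
      ∧ (pvARec ls true).2.2 = (pvProc (pvSplitF ls).2).2) := by
  induction ls with
  | nil => simp [pvARec, pvSplitF, pvProc]
  | cons l t ih =>
    obtain ⟨⟨ihf1, ihf2⟩, ⟨iht1, iht2⟩⟩ := ih
    by_cases hH : pvIsH l = true
    · by_cases hC : pvIsC l = true
      · simp [pvARec, pvSplitF, pvProc, hH, hC, iht1, iht2]
      · simp only [Bool.not_eq_true] at hC
        simp [pvARec, pvSplitF, pvProc, hH, hC, ihf1, ihf2]
    · simp only [Bool.not_eq_true] at hH
      simp [pvARec, pvSplitF, hH, ihf1, ihf2, iht1, iht2]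

theorem stepA_eq_lambda :
    (fun (st : List String × Bool × Int) line =>
    if (PySem.Str.startswith (PySem.Str.lower (PySem.Str.strip line)) "#"
        || PySem.Str.startswith (PySem.Str.lower (PySem.Str.strip line)) "##"
        || PySem.Str.startswith (PySem.Str.lower (PySem.Str.strip line)) "###")
       && PySem.Str.isIn "calendar" (PySem.Str.lower (PySem.Str.strip line)) then
      (st.1, true, st.2.2 + 1)
    else if st.2.1 then
      if PySem.Str.startswith (PySem.Str.strip line) "#"
         || PySem.Str.startswith (PySem.Str.strip line) "##"
         || PySem.Str.startswith (PySem.Str.strip line) "###" then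
        (st.1 ++ [line], false, st.2.2)
      else
        (st.1, st.2.1, st.2.2)
    else
      (st.1 ++ [line], st.2.1, st.2.2)) = pvStepA := rfl

theorem stepB_eq_lambda :
    (fun (st : List (Option String × List String) × Option String × List String) line =>
      if PySem.Str.startswith (PySem.Str.strip line) "#" then
        (st.1 ++ [(st.2.1, st.2.2)], some line, [])
      else
        (st.1, st.2.1, st.2.2 ++ [line])) = pvStepB := rfl

theorem stepC_eq_lambda :
    (fun (st : List String × Int) (sec : Option String × List String) =>
    match sec.1 with
    | some h =>
      if PySem.Str.isIn "calendar" (PySem.Str.lower (PySem.Str.strip h)) then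
        (st.1, st.2 + 1)
      else
        (st.1 ++ [h] ++ sec.2, st.2)
    | none => (st.1 ++ sec.2, st.2)) = pvStepC := rfl

-- ===== VERDICT (by name: the statement is the Claim_ definition above) =====
theorem remove_all_calendar_sections_spec : Claim_equal_remove_all_calendar_sections := by
  intro content _
  unfold Spec_remove_all_calendar_sections
  simp only [remove_all_calendar_sections, remove_all_calendar_sections_alt, pvSections,
    stepA_eq_lambda, stepB_eq_lambda, stepC_eq_lambda]
  rw [aRec_foldl, sections_foldl, proc_foldl]
  obtain ⟨⟨hf1, hf2⟩, _⟩ := main_rec (PySem.Str.splitlines content)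
  simp only [List.nil_append, pvProcO, procO_map, hf1, hf2, zero_add]
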